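-- pv_equiv track=rewrite | github.com/SainandaG/website | living-data-intelligence-backend/backend/app/services/graph_intelligence.py | _count_state_changes
-- ===== SOURCE A (Python) =====
-- from typing import Dict, List, Any
--
-- def _count_state_changes(history: List[Dict]) -> int:
--     """Count how many times state changed"""
--     changes = 0
--     prev_state = None
--     for entry in history:
--         if prev_state and entry['state'] != prev_state:
--             changes += 1
--         prev_state = entry['state']
--     return changes
-- ===== SOURCE B (Python) =====
-- from itertools import groupby
--
-- def _count_state_changes(history):
--     runs = sum(1 for _ in groupby(history, key=lambda e: e['state']))
--     return max(runs - 1, 0)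
-- ===== Notes on version B (the rewrite author's own statement) =====
-- stated objective: idiomatic
-- what changed: Collapses the history into runs of equal consecutive states with itertools.groupby and returns the number of run boundaries, instead of A's manual prev-state loop.
-- intended difference: On histories where an entry with the falsy state '' is immediately followed by an entry with a non-empty state, A's 'if prev_state' truthiness guard silently skips that transition and returns a count that is too small, while B counts it as the state change it is, which is the intended behaviour. — e.g. on _count_state_changes([[("state", "")], [("state", "on")]]): A returns 0, B returns 1
import Mathlib
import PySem

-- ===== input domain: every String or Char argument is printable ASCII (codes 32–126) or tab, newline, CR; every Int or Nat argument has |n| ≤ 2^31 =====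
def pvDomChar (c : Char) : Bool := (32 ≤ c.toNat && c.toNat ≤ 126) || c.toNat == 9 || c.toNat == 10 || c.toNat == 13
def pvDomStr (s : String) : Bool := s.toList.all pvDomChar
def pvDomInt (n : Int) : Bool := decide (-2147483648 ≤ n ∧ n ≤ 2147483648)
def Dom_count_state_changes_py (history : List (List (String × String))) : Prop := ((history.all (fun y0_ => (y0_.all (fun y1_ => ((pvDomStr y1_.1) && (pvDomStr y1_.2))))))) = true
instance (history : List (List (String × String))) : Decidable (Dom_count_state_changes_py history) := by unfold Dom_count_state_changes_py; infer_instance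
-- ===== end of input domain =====

-- B collapses the history into runs of equal consecutive states (itertools.groupby) and
-- returns the number of run boundaries (idiomatic); B counts a transition out of the state ''
-- that A's truthiness guard skips — stated as the intended difference D_ below.

-- ===== PORT A =====
-- entry['state'] (KeyError when absent, excluded by Pre_) -> first-match lookup; '.getD ""' is
-- only reached outside Pre_.
def count_state_changes_py (history : List (List (String × String))) : Int :=
  (history.foldl
    (fun (acc : Int × Option String) entry =>
      let s : String := (entry.lookup "state").getD ""
      ((if (match acc.2 with
            | some p => (p != "") && (s != p)
            | none => false) then acc.1 + 1 else acc.1), some s))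
    (0, none)).1

-- ===== PORT B =====
-- key function e['state'] of Source B (same first-match lookup; default only reached outside Pre_)
def pvStateKey (e : List (String × String)) : String := (e.lookup "state").getD ""

-- itertools.groupby key collapse: one key per maximal run of equal consecutive states
def pvCollapse : List String → List String
  | [] => []
  | [x] => [x]
  | x :: y :: rest => if x = y then pvCollapse (y :: rest) else x :: pvCollapse (y :: rest)

def count_state_changes_py_alt (history : List (List (String × String))) : Int :=
  max (((pvCollapse (history.map pvStateKey)).length : Int) - 1) 0

-- ===== PRECONDITION & SPEC =====
-- Pre_ excludes exactly the entries on which Python A raises KeyError: some dict lacks 'state'.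
def Pre_count_state_changes_py (history : List (List (String × String))) : Prop :=
  ∀ e ∈ history, (e.lookup "state").isSome
instance (history : List (List (String × String))) : Decidable (Pre_count_state_changes_py history) := by unfold Pre_count_state_changes_py; infer_instance
def pvWitness_count_state_changes_py : (List (List (String × String))) :=
  [[("state", "on")], [("state", "off")], [("state", "off")]]

-- On histories where an entry with the falsy state '' is immediately followed by an entry with
-- a non-empty state, A's 'if prev_state' truthiness guard silently skips that transition and
-- returns a count that is too small, while B counts it as the state change it is (intended).
def D_count_state_changes_py (history : List (List (String × String))) : Prop :=
  ∃ p ∈ history.zip history.tail,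
    p.1.lookup "state" = some "" ∧ p.2.lookup "state" ≠ some ""
instance (history : List (List (String × String))) : Decidable (D_count_state_changes_py history) := by unfold D_count_state_changes_py; infer_instance

def Spec_count_state_changes_py (history : List (List (String × String))) (out : Int) : Prop := ¬ D_count_state_changes_py history → out = count_state_changes_py_alt history
instance (history : List (List (String × String))) (out : Int) : Decidable (Spec_count_state_changes_py history out) := by unfold Spec_count_state_changes_py; infer_instance

def pvDiffWitness_count_state_changes_py : (List (List (String × String))) :=
  [[("state", "")], [("state", "on")]]
def pvDiffWitnessOut_count_state_changes_py : Int × Int := (0, 1)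

-- ===== CLAIM (what is proved, stated in full; the proofs are below) =====
def Claim_unchanged_count_state_changes_py : Prop := ∀ (history : List (List (String × String))), Dom_count_state_changes_py history → Pre_count_state_changes_py history → Spec_count_state_changes_py history (count_state_changes_py history)
def Claim_changed_count_state_changes_py : Prop := Dom_count_state_changes_py (pvDiffWitness_count_state_changes_py) ∧ Pre_count_state_changes_py (pvDiffWitness_count_state_changes_py) ∧ D_count_state_changes_py (pvDiffWitness_count_state_changes_py) ∧ count_state_changes_py (pvDiffWitness_count_state_changes_py) = pvDiffWitnessOut_count_state_changes_py.1 ∧ count_state_changes_py_alt (pvDiffWitness_count_state_changes_py) = pvDiffWitnessOut_count_state_changes_py.2 ∧ pvDiffWitnessOut_count_state_changes_py.1 ≠ pvDiffWitnessOut_count_state_changes_py.2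
def Claim_exact_count_state_changes_py : Prop := ∀ (history : List (List (String × String))), Dom_count_state_changes_py history → Pre_count_state_changes_py history → D_count_state_changes_py history → count_state_changes_py history ≠ count_state_changes_py_alt history

-- ===== LEMMAS AND PROOFS =====

-- continuation form of A's loop over the list of state keys
def pvG : Option String → List String → Int
  | _, [] => 0
  | prev, s :: rest =>
      (if (match prev with
           | some p => (p != "") && (s != p)
           | none => false) then 1 else 0) + pvG (some s) rest

-- number of adjacent unequal pairs (B's run boundaries, unfolded)
def pvN : List String → Int
  | x :: y :: r => (if x ≠ y then 1 else 0) + pvN (y :: r)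
  | _ => 0

-- adjacent pairs A's truthiness guard drops
def pvBad : List String → Int
  | x :: y :: r => (if x = "" ∧ y ≠ "" then 1 else 0) + pvBad (y :: r)
  | _ => 0

theorem pvA_fold (hist : List (List (String × String))) :
    ∀ (c : Int) (prev : Option String),
    (hist.foldl
      (fun (acc : Int × Option String) entry =>
        let s : String := (entry.lookup "state").getD ""
        ((if (match acc.2 with
              | some p => (p != "") && (s != p)
              | none => false) then acc.1 + 1 else acc.1), some s))
      (c, prev)).1 = c + pvG prev (hist.map pvStateKey) := by
  induction hist with
  | nil => intro c prev; simp [pvG]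
  | cons e t ih =>
      intro c prev
      simp only [List.foldl_cons, List.map_cons, pvG, pvStateKey]
      rw [ih]
      cases prev with
      | none => simp
      | some p =>
          by_cases h : (p != "" && ((List.lookup "state" e).getD "" != p)) = true
          · simp only [h]; simp; omega
          · simp only [Bool.not_eq_true] at h
            simp only [h]; simp

theorem pvCollapse_ne_nil (x : String) (l : List String) : pvCollapse (x :: l) ≠ [] := by
  induction l generalizing x with
  | nil => simp [pvCollapse]
  | cons y t ih =>
      simp only [pvCollapse]
      split
      · exact ih y
      · simp

-- B's value equals pvN
theorem pvB_N (keys : List String) :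
    max (((pvCollapse keys).length : Int) - 1) 0 = pvN keys := by
  induction keys using pvCollapse.induct with
  | case1 => simp [pvCollapse, pvN]
  | case2 x => simp [pvCollapse, pvN]
  | case3 y rest ih =>
      rw [show pvCollapse (y :: y :: rest) = pvCollapse (y :: rest) from by simp [pvCollapse]]
      rw [ih]; simp [pvN]
  | case4 x y rest hxy ih =>
      rw [show pvCollapse (x :: y :: rest) = x :: pvCollapse (y :: rest) from by
        simp [pvCollapse, hxy]]
      have h1 : 1 ≤ (pvCollapse (y :: rest)).length :=
        List.length_pos_iff.mpr (pvCollapse_ne_nil y rest)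
      simp only [pvN, hxy, if_pos, ne_eq, not_false_iff] at *
      simp only [List.length_cons]
      rw [← ih]
      simp
      omega

-- A = pvN - pvBad, via the generalized invariant over the previous state
theorem pvGN_aux (l : List String) : ∀ (x : String),
    pvN (x :: l) = pvG (some x) l + pvBad (x :: l) := by
  induction l with
  | nil => intro x; simp [pvN, pvG, pvBad]
  | cons y r ih =>
      intro x
      simp only [pvN, pvG, pvBad]
      rw [show pvN (y :: r) = pvG (some y) r + pvBad (y :: r) from ih y]
      by_cases hx : x = ""
      · subst hx
        by_cases hy : y = ""
        · subst hy; simp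
        · have h2 : ("" : String) ≠ y := fun h => hy h.symm
          simp [hy, h2]
          omega
      · by_cases hxy : x = y
        · subst hxy; simp
        · have h1 : (x != "") = true := by simp [hx]
          have h2 : (y != x) = true := by simp [bne_iff_ne]; exact fun h => hxy h.symm
          simp only [h1, h2, Bool.true_and, if_true, hx]
          simp [hxy]
          omega

theorem pvG_N (keys : List String) : pvN keys = pvG none keys + pvBad keys := by
  cases keys with
  | nil => simp [pvN, pvG, pvBad]
  | cons x l =>
      have : pvG none (x :: l) = pvG (some x) l := by simp [pvG]
      rw [this]
      exact pvGN_aux l x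

theorem pvBad_nonneg (keys : List String) : 0 ≤ pvBad keys := by
  induction keys with
  | nil => simp [pvBad]
  | cons x l ih =>
      cases l with
      | nil => simp [pvBad]
      | cons y r =>
          simp only [pvBad] at *
          split_ifs <;> omega

-- translate D_ into pvBad over the mapped keys, under Pre_
theorem pvBad_D : ∀ (history : List (List (String × String))),
    Pre_count_state_changes_py history →
    (pvBad (history.map pvStateKey) = 0 ↔ ¬ D_count_state_changes_py history) := by
  intro history
  induction history with
  | nil => intro _; simp [pvBad, D_count_state_changes_py]
  | cons e t ih =>
      intro hpre
      cases t with
      | nil => simp [pvBad, D_count_state_changes_py]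
      | cons f r =>
          have hpre' : Pre_count_state_changes_py (f :: r) := by
            intro a ha; exact hpre a (List.mem_cons_of_mem _ ha)
          have he : (e.lookup "state").isSome := hpre e List.mem_cons_self
          have hf : (f.lookup "state").isSome := hpre f (by simp)
          obtain ⟨se, hse⟩ := Option.isSome_iff_exists.mp he
          obtain ⟨sf, hsf⟩ := Option.isSome_iff_exists.mp hf
          have ihiff := ih hpre'
          simp only [D_count_state_changes_py, List.map_cons, pvBad, List.tail_cons,
            List.zip_cons_cons, List.mem_cons] at *
          have hke : pvStateKey e = se := by simp [pvStateKey, hse]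
          have hkf : pvStateKey f = sf := by simp [pvStateKey, hsf]
          rw [hke, hkf]
          have hnn : 0 ≤ pvBad (sf :: r.map pvStateKey) := pvBad_nonneg _
          have hkf' : pvStateKey f :: r.map pvStateKey = sf :: r.map pvStateKey := by rw [hkf]
          rw [hkf'] at ihiff
          by_cases hc : se = "" ∧ sf ≠ ""
          · constructor
            · intro h0
              exfalso
              simp [hc] at h0
              omega
            · intro hnd
              exfalso
              apply hnd
              exact ⟨(e, f), Or.inl rfl, by rw [hse, hc.1], by rw [hsf]; simpa using hc.2⟩
          · have hc0 : (if se = "" ∧ sf ≠ "" then (1:Int) else 0) = 0 := by simp [hc]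
            rw [hc0, zero_add, ihiff]
            constructor
            · intro hnd ⟨p, hp, h1, h2⟩
              rcases hp with hp | hp
              · subst hp
                simp only at h1 h2
                rw [hse] at h1; rw [hsf] at h2
                exact hc ⟨by injection h1, by intro h; exact h2 (by rw [h])⟩
              · exact hnd ⟨p, hp, h1, h2⟩
            · intro hnd ⟨p, hp, h1, h2⟩
              exact hnd ⟨p, Or.inr hp, h1, h2⟩

-- ===== VERDICT (by name: the statement is the Claim_ definition above) =====
theorem count_state_changes_py_spec : Claim_unchanged_count_state_changes_py := by
  intro history _ hpre hnd
  unfold count_state_changes_py count_state_changes_py_alt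
  rw [pvA_fold, pvB_N, zero_add]
  have h0 : pvBad (history.map pvStateKey) = 0 := (pvBad_D history hpre).mpr hnd
  have := pvG_N (history.map pvStateKey)
  omega

theorem count_state_changes_py_changed : Claim_changed_count_state_changes_py := by
  unfold Claim_changed_count_state_changes_py; decide

theorem count_state_changes_py_tight : Claim_exact_count_state_changes_py := by
  intro history _ hpre hd
  unfold count_state_changes_py count_state_changes_py_alt
  rw [pvA_fold, pvB_N, zero_add]
  have h0 : pvBad (history.map pvStateKey) ≠ 0 := by
    intro h; exact ((pvBad_D history hpre).mp h) hd
  have h1 := pvBad_nonneg (history.map pvStateKey)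
  have := pvG_N (history.map pvStateKey)
  omega
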